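-- pv_equiv track=rewrite | github.com/yingl/LintCodeInPython | minimum-step.py | minimumStep
-- ===== SOURCE A (Python) =====
-- def minimumStep(colors):
--     # write your code here
--     ret = 0
--     n = len(colors)
--     visited = set([])
--     points = [set([0]), set()]
--     curr, _next = 0, 1
--     cmap = {}
--     for i in range(n):
--         c = colors[i]
--         if c not in cmap:
--             cmap[c] = set()
--         cmap[c].add(i)
--     while points[curr]:
--         for i in points[curr]:
--             if i not in visited:
--                 if i == n - 1:
--                     return ret
--                 if ((i - 1) > 0) and ((i - 1) not in visited):
--                     points[_next].add(i - 1)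
--                 if ((i + 1) < n) and ((i + 1) not in visited):
--                     points[_next].add(i + 1)
--                 for j in cmap[colors[i]]:
--                     if (j != i) and (j not in visited):
--                         points[_next].add(j)
--                 cmap[colors[i]].clear() # Clear this color! Important!!!
--                 visited.add(i)
--         points[curr].clear()
--         curr, _next = _next, curr
--         ret += 1
--     return ret
-- ===== SOURCE B (Python) =====
-- def minimumStep(colors):
--     # Level-counting by monotone reachable-set closure: no visited set, no
--     # frontier ping-pong, no color clearing; grow `reached` once per step
--     # until the last index appears.
--     n = len(colors)
--     cmap = {}
--     for i in range(n):
--         cmap.setdefault(colors[i], []).append(i)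
--     reached = {0}
--     k = 0
--     while (n - 1) not in reached:
--         nxt = set(reached)
--         for i in reached:
--             if i > 0:
--                 nxt.add(i - 1)
--             if i + 1 < n:
--                 nxt.add(i + 1)
--             nxt.update(cmap[colors[i]])
--         reached = nxt
--         k += 1
--     return k
-- ===== Notes on version B (the rewrite author's own statement) =====
-- stated objective: simpler
-- what changed: Replaces the two ping-pong frontier sets, the visited set, the mid-level early return and the color-map clearing by a single monotone reachable-set that is closed one step per iteration until the last index appears, counting iterations; this is shorter and plainer but asymptotically slower in the worst case, since the whole reached set is re-expanded each level.
import Mathlib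
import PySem

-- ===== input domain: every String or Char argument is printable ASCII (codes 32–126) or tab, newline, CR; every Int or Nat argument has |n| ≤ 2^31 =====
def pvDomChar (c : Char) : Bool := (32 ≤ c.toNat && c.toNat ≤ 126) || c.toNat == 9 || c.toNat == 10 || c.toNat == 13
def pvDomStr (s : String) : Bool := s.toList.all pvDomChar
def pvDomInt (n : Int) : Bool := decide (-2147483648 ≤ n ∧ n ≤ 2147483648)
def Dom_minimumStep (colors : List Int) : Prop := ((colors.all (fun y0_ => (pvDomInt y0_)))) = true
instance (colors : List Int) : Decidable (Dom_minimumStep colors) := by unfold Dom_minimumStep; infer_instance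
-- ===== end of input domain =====

-- B replaces A's ping-pong level sets, visited set and color-clearing by one monotone
-- reachable-set closed step by step: shorter and plainer, but not faster (worst case slower).

-- ===== PORT A =====
-- building cmap: for i in range(n): c = colors[i]; if c not in cmap: cmap[c] = set(); cmap[c].add(i)
def pvCmapAStep (colors : List Int) (m : PySem.Dict Int (PySem.Set Int)) (i : Int) :
    PySem.Dict Int (PySem.Set Int) :=
  -- c = colors[i] (i ∈ range(n) is always in range); if c not in cmap: cmap[c] = set(); cmap[c].add(i)
  (if m.contains (PySem.List.pyGetD colors i 0) then m
   else m.insert (PySem.List.pyGetD colors i 0) PySem.Set.empty).modify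
    (PySem.List.pyGetD colors i 0) PySem.Set.empty (fun s => PySem.Set.add s i)

def pvCmapA (colors : List Int) : PySem.Dict Int (PySem.Set Int) :=
  (PySem.List.pyRange 0 (colors.length : Int) 1).foldl (pvCmapAStep colors) PySem.Dict.empty

-- the inner `for i in points[curr]` loop; `none` = Python's `return ret`
def pvLevelA (colors : List Int) (n : Int) :
    List Int → PySem.Set Int → PySem.Set Int → PySem.Dict Int (PySem.Set Int) →
    Option (PySem.Set Int × PySem.Set Int × PySem.Dict Int (PySem.Set Int))
  | [], visited, nxt, cmap => some (visited, nxt, cmap)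
  | i :: rest, visited, nxt, cmap =>
    if i ∈ visited then pvLevelA colors n rest visited nxt cmap
    else if i = n - 1 then none
    else
      let nxt1 := if i - 1 > 0 ∧ (i - 1) ∉ visited then PySem.Set.add nxt (i - 1) else nxt
      let nxt2 := if i + 1 < n ∧ (i + 1) ∉ visited then PySem.Set.add nxt1 (i + 1) else nxt1
      -- cmap[colors[i]]: the key is always present (i is an in-range index), default unread
      let cls := cmap.getD (PySem.List.pyGetD colors i 0) PySem.Set.empty
      let nxt3 := cls.foldl (fun s j => if j ≠ i ∧ j ∉ visited then PySem.Set.add s j else s) nxt2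
      pvLevelA colors n rest (PySem.Set.add visited i) nxt3
        (cmap.insert (PySem.List.pyGetD colors i 0) PySem.Set.empty)  -- cmap[colors[i]].clear()

-- the `while points[curr]` loop; fuel (length+2) strictly exceeds the number of
-- iterations the Python performs, so the fuel-0 branch is never reached
def pvLoopA (colors : List Int) (n : Int) :
    Nat → PySem.Set Int → PySem.Set Int → PySem.Dict Int (PySem.Set Int) → Int → Int
  | 0, _, _, _, ret => ret
  | fuel + 1, frontier, visited, cmap, ret =>
    if frontier = PySem.Set.empty then ret
    else
      match pvLevelA colors n frontier visited PySem.Set.empty cmap with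
      | none => ret
      | some (visited', nxt, cmap') => pvLoopA colors n fuel nxt visited' cmap' (ret + 1)

def minimumStep (colors : List Int) : Int :=
  pvLoopA colors (colors.length : Int) (colors.length + 2)
    (PySem.Set.ofList [0]) PySem.Set.empty (pvCmapA colors) 0

-- ===== PORT B =====
-- cmap.setdefault(colors[i], []).append(i)
def pvCmapB (colors : List Int) : PySem.Dict Int (List Int) :=
  (PySem.List.pyRange 0 (colors.length : Int) 1).foldl
    (fun m i => m.modify (PySem.List.pyGetD colors i 0) [] (fun l => l ++ [i]))
    PySem.Dict.empty

def pvExpandBStep (colors : List Int) (n : Int) (cmap : PySem.Dict Int (List Int))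
    (s : PySem.Set Int) (i : Int) : PySem.Set Int :=
  let s1 := if i > 0 then PySem.Set.add s (i - 1) else s
  let s2 := if i + 1 < n then PySem.Set.add s1 (i + 1) else s1
  -- cmap[colors[i]]: key always present for an in-range index, default unread
  PySem.Set.update s2 (cmap.getD (PySem.List.pyGetD colors i 0) [])

-- nxt = set(reached); for i in reached: … ; reached = nxt
def pvExpandB (colors : List Int) (n : Int) (cmap : PySem.Dict Int (List Int))
    (reached : PySem.Set Int) : PySem.Set Int :=
  reached.foldl (pvExpandBStep colors n cmap) reached

-- while (n-1) not in reached; fuel length+2 strictly exceeds the levels Python needs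
def pvLoopB (colors : List Int) (n : Int) (cmap : PySem.Dict Int (List Int)) :
    Nat → PySem.Set Int → Int → Int
  | 0, _, k => k
  | fuel + 1, reached, k =>
    if (n - 1) ∈ reached then k
    else pvLoopB colors n cmap fuel (pvExpandB colors n cmap reached) (k + 1)

def minimumStep_alt (colors : List Int) : Int :=
  pvLoopB colors (colors.length : Int) (pvCmapB colors) (colors.length + 2)
    (PySem.Set.ofList [0]) 0

-- ===== PRECONDITION & SPEC =====
-- Pre_ excludes only the empty list, on which both A and B raise IndexError (colors[0]).
def Pre_minimumStep (colors : List Int) : Prop := colors ≠ []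
instance (colors : List Int) : Decidable (Pre_minimumStep colors) := by
  unfold Pre_minimumStep; infer_instance

def pvWitness_minimumStep : List Int := [1, 2, 1]

def Spec_minimumStep (colors : List Int) (out : Int) : Prop := out = minimumStep_alt colors
instance (colors : List Int) (out : Int) : Decidable (Spec_minimumStep colors out) := by
  unfold Spec_minimumStep; infer_instance

-- ===== CLAIM (what is proved, stated in full; the proofs are below) =====
def Claim_equal_minimumStep : Prop := ∀ (colors : List Int), Dom_minimumStep colors →
  Pre_minimumStep colors → Spec_minimumStep colors (minimumStep colors)

-- ===== LEMMAS AND PROOFS =====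

-- colors[i] as used by both ports
def pvCol (colors : List Int) (i : Int) : Int := PySem.List.pyGetD colors i 0

-- the edge relation A's BFS walks: i-1 (guarded by i-1 > 0), i+1, same-color indices
def pvNbr (colors : List Int) (i j : Int) : Prop :=
  (j = i - 1 ∧ 0 < i - 1) ∨ (j = i + 1 ∧ i + 1 < (colors.length : Int)) ∨
  (j ≠ i ∧ 0 ≤ j ∧ j < (colors.length : Int) ∧ pvCol colors j = pvCol colors i)

theorem mem_pvCmapB (colors : List Int) (c x : Int) :
    x ∈ (pvCmapB colors).getD c [] ↔
      0 ≤ x ∧ x < (colors.length : Int) ∧ pvCol colors x = c := by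
  unfold pvCmapB
  have h : (PySem.List.pyRange 0 (colors.length : Int) 1).foldl
      (fun m i => m.modify (PySem.List.pyGetD colors i 0) [] (fun l => l ++ [i]))
      PySem.Dict.empty
    = ((PySem.List.pyRange 0 (colors.length : Int) 1).map
        (fun i => (PySem.List.pyGetD colors i 0, i))).foldl
      (fun d p => d.modify p.1 [] (fun l => l ++ [p.2])) PySem.Dict.empty := by
    rw [List.foldl_map]
  rw [h, PySem.Dict.getD_foldl_modify_append]
  simp only [PySem.Dict.getD_empty, List.nil_append, List.mem_map, List.mem_filter,
    List.mem_map, PySem.List.mem_pyRange_one]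
  constructor
  · rintro ⟨p, ⟨⟨i, ⟨hi1, hi2⟩, rfl⟩, hc⟩, rfl⟩
    simp only [beq_iff_eq] at hc
    exact ⟨hi1, hi2, hc⟩
  · rintro ⟨h1, h2, h3⟩
    exact ⟨(c, x), ⟨⟨x, ⟨h1, h2⟩, by simp [pvCol] at h3 ⊢; rw [h3]⟩, by simp⟩, rfl⟩

theorem getD_pvCmapAStep (colors : List Int) (m : PySem.Dict Int (PySem.Set Int))
    (i c x : Int) :
    x ∈ (pvCmapAStep colors m i).getD c PySem.Set.empty ↔
      x ∈ m.getD c PySem.Set.empty ∨ (x = i ∧ pvCol colors i = c) := by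
  unfold pvCmapAStep
  rw [PySem.Dict.getD_modify]
  by_cases hcc : c = PySem.List.pyGetD colors i 0
  · rw [if_pos hcc]
    by_cases hm : m.contains (PySem.List.pyGetD colors i 0)
    · rw [if_pos hm]
      subst hcc
      simp only [PySem.Set.mem_add, pvCol]
      tauto
    · subst hcc
      rw [if_neg hm, PySem.Dict.getD_insert_self]
      have hz : m.getD (PySem.List.pyGetD colors i 0) PySem.Set.empty = PySem.Set.empty := by
        apply PySem.Dict.getD_of_not_contains
        simpa using hm
      rw [hz]
      simp [PySem.Set.empty, pvCol]
  · rw [if_neg hcc]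
    by_cases hm : m.contains (PySem.List.pyGetD colors i 0)
    · rw [if_pos hm]
      constructor
      · exact Or.inl
      · rintro (h | ⟨rfl, hcol⟩)
        · exact h
        · exact absurd hcol.symm hcc
    · rw [if_neg hm, PySem.Dict.getD_insert]
      rw [if_neg hcc]
      constructor
      · exact Or.inl
      · rintro (h | ⟨rfl, hcol⟩)
        · exact h
        · exact absurd hcol.symm hcc

theorem mem_pvCmapA (colors : List Int) (c x : Int) :
    x ∈ (pvCmapA colors).getD c PySem.Set.empty ↔
      0 ≤ x ∧ x < (colors.length : Int) ∧ pvCol colors x = c := by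
  have aux : ∀ (is : List Int) (m : PySem.Dict Int (PySem.Set Int)),
      x ∈ (is.foldl (pvCmapAStep colors) m).getD c PySem.Set.empty ↔
        x ∈ m.getD c PySem.Set.empty ∨ (x ∈ is ∧ pvCol colors x = c) := by
    intro is
    induction is with
    | nil => simp
    | cons a t ih =>
      intro m
      simp only [List.foldl_cons, ih, getD_pvCmapAStep]
      constructor
      · rintro ((h | ⟨rfl, hc⟩) | h)
        · exact Or.inl h
        · exact Or.inr ⟨List.mem_cons_self, hc⟩
        · exact Or.inr ⟨List.mem_cons_of_mem _ h.1, h.2⟩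
      · rintro (h | ⟨hm, hc⟩)
        · exact Or.inl (Or.inl h)
        · rcases List.mem_cons.1 hm with rfl | hm
          · exact Or.inl (Or.inr ⟨rfl, hc⟩)
          · exact Or.inr ⟨hm, hc⟩
  unfold pvCmapA
  rw [aux]
  simp [PySem.Dict.getD_empty, PySem.Set.empty, PySem.List.mem_pyRange_one]
  tauto

theorem mem_foldl_ite_add (P : Int → Prop) [DecidablePred P] (x : Int) :
    ∀ (l : List Int) (s : PySem.Set Int),
      x ∈ l.foldl (fun s j => if P j then PySem.Set.add s j else s) s ↔
        x ∈ s ∨ (x ∈ l ∧ P x) := by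
  intro l
  induction l with
  | nil => simp
  | cons a t ih =>
    intro s
    simp only [List.foldl_cons, ih]
    by_cases hp : P a
    · simp only [if_pos hp, PySem.Set.mem_add]
      constructor
      · rintro (( h | rfl) | h)
        · exact Or.inl h
        · exact Or.inr ⟨List.mem_cons_self, hp⟩
        · exact Or.inr ⟨List.mem_cons_of_mem _ h.1, h.2⟩
      · rintro (h | ⟨hm, hP⟩)
        · exact Or.inl (Or.inl h)
        · rcases List.mem_cons.1 hm with rfl | hm
          · exact Or.inl (Or.inr rfl)
          · exact Or.inr ⟨hm, hP⟩
    · simp only [if_neg hp]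
      constructor
      · rintro (h | h)
        · exact Or.inl h
        · exact Or.inr ⟨List.mem_cons_of_mem _ h.1, h.2⟩
      · rintro (h | ⟨hm, hP⟩)
        · exact Or.inl h
        · rcases List.mem_cons.1 hm with rfl | hm
          · exact absurd hP hp
          · exact Or.inr ⟨hm, hP⟩

theorem mem_pvExpandBStep (colors : List Int) (n : Int) (cm : PySem.Dict Int (List Int))
    (s : PySem.Set Int) (i x : Int) :
    x ∈ pvExpandBStep colors n cm s i ↔
      x ∈ s ∨ (0 < i ∧ x = i - 1) ∨ (i + 1 < n ∧ x = i + 1) ∨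
        x ∈ cm.getD (pvCol colors i) [] := by
  unfold pvExpandBStep pvCol
  simp only [PySem.Set.mem_update]
  by_cases h1 : i > 0 <;> by_cases h2 : i + 1 < n <;>
    simp [h1, h2, PySem.Set.mem_add] <;> tauto

theorem mem_pvExpandB (colors : List Int) (n : Int) (cm : PySem.Dict Int (List Int))
    (r : PySem.Set Int) (x : Int) :
    x ∈ pvExpandB colors n cm r ↔
      x ∈ r ∨ ∃ i ∈ r, ((0 < i ∧ x = i - 1) ∨ (i + 1 < n ∧ x = i + 1) ∨
        x ∈ cm.getD (pvCol colors i) []) := by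
  have aux : ∀ (l : List Int) (s : PySem.Set Int),
      x ∈ l.foldl (pvExpandBStep colors n cm) s ↔
        x ∈ s ∨ ∃ i ∈ l, ((0 < i ∧ x = i - 1) ∨ (i + 1 < n ∧ x = i + 1) ∨
          x ∈ cm.getD (pvCol colors i) []) := by
    intro l
    induction l with
    | nil => simp
    | cons a t ih =>
      intro s
      simp only [List.foldl_cons, ih, mem_pvExpandBStep]
      constructor
      · rintro ((h | h) | ⟨i, hi, hh⟩)
        · exact Or.inl h
        · exact Or.inr ⟨a, List.mem_cons_self, h⟩
        · exact Or.inr ⟨i, List.mem_cons_of_mem _ hi, hh⟩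
      · rintro (h | ⟨i, hi, hh⟩)
        · exact Or.inl (Or.inl h)
        · rcases List.mem_cons.1 hi with rfl | hi
          · exact Or.inl (Or.inr hh)
          · exact Or.inr ⟨i, hi, hh⟩
  exact aux r r

theorem pvLevelA_inv (colors : List Int) (reached : PySem.Set Int)
    (hR : ∀ x ∈ reached, 0 ≤ x ∧ x < (colors.length : Int)) :
    ∀ (L : List Int) (V N : PySem.Set Int) (M : PySem.Dict Int (PySem.Set Int)),
    (∀ x ∈ L, x ∈ reached) →
    (∀ x ∈ V, x ∈ reached) →
    ((colors.length : Int) - 1 ∉ V) →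
    (∀ c, M.getD c PySem.Set.empty = (pvCmapA colors).getD c PySem.Set.empty ∨
          (M.getD c PySem.Set.empty = PySem.Set.empty ∧
           ∀ j ∈ (pvCmapA colors).getD c PySem.Set.empty, j ∈ reached ∨ j ∈ N)) →
    (∀ i ∈ V, ∀ j, pvNbr colors i j → j ∈ reached ∨ j ∈ N) →
    (∀ x ∈ N, (x ∈ reached ∨ ∃ i ∈ reached, pvNbr colors i x) ∧
              0 ≤ x ∧ x < (colors.length : Int)) →
    ( ((colors.length : Int) - 1 ∈ L →
        pvLevelA colors (colors.length : Int) L V N M = none) ∧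
      (pvLevelA colors (colors.length : Int) L V N M = none →
        (colors.length : Int) - 1 ∈ L) ∧
      ∀ V' N' M', pvLevelA colors (colors.length : Int) L V N M = some (V', N', M') →
        (∀ x, x ∈ V' ↔ (x ∈ V ∨ x ∈ L)) ∧
        ((colors.length : Int) - 1 ∉ V') ∧
        (∀ c, M'.getD c PySem.Set.empty = (pvCmapA colors).getD c PySem.Set.empty ∨
              (M'.getD c PySem.Set.empty = PySem.Set.empty ∧
               ∀ j ∈ (pvCmapA colors).getD c PySem.Set.empty, j ∈ reached ∨ j ∈ N')) ∧
        (∀ i ∈ V', ∀ j, pvNbr colors i j → j ∈ reached ∨ j ∈ N') ∧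
        (∀ x ∈ N', (x ∈ reached ∨ ∃ i ∈ reached, pvNbr colors i x) ∧
                   0 ≤ x ∧ x < (colors.length : Int)) ) := by
  intro L
  induction L with
  | nil =>
    intro V N M _ h2 h3 h4 h5 h6
    refine ⟨by intro h; simp at h, ?_, ?_⟩
    · intro h; simp [pvLevelA] at h
    · intro V' N' M' h
      simp only [pvLevelA, Option.some.injEq, Prod.mk.injEq] at h
      obtain ⟨rfl, rfl, rfl⟩ := h
      exact ⟨by simp, h3, h4, h5, h6⟩
  | cons i rest ih =>
    intro V N M h1 h2 h3 h4 h5 h6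
    have hiR : i ∈ reached := h1 i List.mem_cons_self
    have hirange := hR i hiR
    by_cases hiv : i ∈ V
    · have heq : pvLevelA colors (colors.length : Int) (i :: rest) V N M
          = pvLevelA colors (colors.length : Int) rest V N M := by
        simp [pvLevelA, hiv]
      rw [heq]
      obtain ⟨c1, c2, c3⟩ := ih V N M (fun x hx => h1 x (List.mem_cons_of_mem _ hx)) h2 h3 h4 h5 h6
      refine ⟨?_, ?_, ?_⟩
      · intro hL
        rcases List.mem_cons.1 hL with he | h
        · exact absurd (he ▸ hiv) h3
        · exact c1 h
      · intro h; exact List.mem_cons_of_mem _ (c2 h)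
      · intro V' N' M' h
        obtain ⟨cViff, ch3, ch4, ch5, ch6⟩ := c3 V' N' M' h
        refine ⟨?_, ch3, ch4, ch5, ch6⟩
        intro x
        rw [cViff x, List.mem_cons]
        constructor
        · rintro (h | h)
          · exact Or.inl h
          · exact Or.inr (Or.inr h)
        · rintro (h | (rfl | h))
          · exact Or.inl h
          · exact Or.inl hiv
          · exact Or.inr h
    · by_cases hin : i = (colors.length : Int) - 1
      · have heq : pvLevelA colors (colors.length : Int) (i :: rest) V N M = none := by
          simp only [pvLevelA, if_neg hiv, if_pos hin]
        refine ⟨fun _ => heq, fun _ => ?_, ?_⟩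
        · rw [← hin]; exact List.mem_cons_self
        · intro V' N' M' h
          rw [heq] at h; cases h
      · -- i is processed
        have heq : pvLevelA colors (colors.length : Int) (i :: rest) V N M
            = pvLevelA colors (colors.length : Int) rest (PySem.Set.add V i)
                ((M.getD (PySem.List.pyGetD colors i 0) PySem.Set.empty).foldl
                  (fun s j => if j ≠ i ∧ j ∉ V then PySem.Set.add s j else s)
                  (if i + 1 < (colors.length : Int) ∧ (i + 1) ∉ V then
                     PySem.Set.add
                       (if i - 1 > 0 ∧ (i - 1) ∉ V then PySem.Set.add N (i - 1) else N) (i + 1)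
                   else (if i - 1 > 0 ∧ (i - 1) ∉ V then PySem.Set.add N (i - 1) else N)))
                (M.insert (PySem.List.pyGetD colors i 0) PySem.Set.empty) := by
          simp [pvLevelA, hiv, hin]
        set N1 := (if i - 1 > 0 ∧ (i - 1) ∉ V then PySem.Set.add N (i - 1) else N) with hN1
        set N2 := (if i + 1 < (colors.length : Int) ∧ (i + 1) ∉ V then
            PySem.Set.add N1 (i + 1) else N1) with hN2
        set cls := M.getD (PySem.List.pyGetD colors i 0) PySem.Set.empty with hcls
        set N3 := cls.foldl (fun s j => if j ≠ i ∧ j ∉ V then PySem.Set.add s j else s) N2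
          with hN3
        set M2 := M.insert (PySem.List.pyGetD colors i 0) PySem.Set.empty with hM2
        have hmem2 : ∀ x, x ∈ N2 ↔ (x ∈ N ∨
            ((i - 1 > 0 ∧ (i - 1) ∉ V) ∧ x = i - 1) ∨
            ((i + 1 < (colors.length : Int) ∧ (i + 1) ∉ V) ∧ x = i + 1)) := by
          intro x
          rw [hN2, hN1]
          split_ifs with hc2 hc1 hc1 <;>
            (try simp only [PySem.Set.mem_add]) <;> tauto
        have hmem3 : ∀ x, x ∈ N3 ↔ (x ∈ N2 ∨ (x ∈ cls ∧ x ≠ i ∧ x ∉ V)) := by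
          intro x
          rw [hN3]
          exact mem_foldl_ite_add (fun j => j ≠ i ∧ j ∉ V) x cls N2
        have hNsub : ∀ x ∈ N, x ∈ N3 := by
          intro x hx
          exact (hmem3 x).2 (Or.inl ((hmem2 x).2 (Or.inl hx)))
        have hcolEq : pvCol colors i = PySem.List.pyGetD colors i 0 := rfl
        have factK : ∀ j ∈ (pvCmapA colors).getD (PySem.List.pyGetD colors i 0) PySem.Set.empty,
            j ∈ reached ∨ j ∈ N3 := by
          rcases h4 (PySem.List.pyGetD colors i 0) with hint | ⟨hclr, hcov⟩
          · intro j hj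
            by_cases hji : j = i
            · exact Or.inl (hji ▸ hiR)
            · by_cases hjV : j ∈ V
              · exact Or.inl (h2 j hjV)
              · refine Or.inr ((hmem3 j).2 (Or.inr ⟨?_, hji, hjV⟩))
                rw [hcls, hint]; exact hj
          · intro j hj
            rcases hcov j hj with h | h
            · exact Or.inl h
            · exact Or.inr (hNsub j h)
        have factNbrI : ∀ j, pvNbr colors i j → j ∈ reached ∨ j ∈ N3 := by
          rintro j (⟨rfl, hpos⟩ | ⟨rfl, hlt⟩ | ⟨hne, hge, hlt, hcol⟩)
          · by_cases hv : i - 1 ∈ V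
            · exact Or.inl (h2 _ hv)
            · exact Or.inr ((hmem3 _).2 (Or.inl ((hmem2 _).2
                (Or.inr (Or.inl ⟨⟨hpos, hv⟩, rfl⟩)))))
          · by_cases hv : i + 1 ∈ V
            · exact Or.inl (h2 _ hv)
            · exact Or.inr ((hmem3 _).2 (Or.inl ((hmem2 _).2
                (Or.inr (Or.inr ⟨⟨hlt, hv⟩, rfl⟩)))))
          · exact factK j ((mem_pvCmapA colors _ j).2 ⟨hge, hlt, by rw [hcol, hcolEq]⟩)
        have h1' : ∀ x ∈ rest, x ∈ reached := fun x hx => h1 x (List.mem_cons_of_mem _ hx)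
        have h2' : ∀ x ∈ PySem.Set.add V i, x ∈ reached := by
          intro x hx
          rw [PySem.Set.mem_add] at hx
          rcases hx with h | rfl
          · exact h2 x h
          · exact hiR
        have h3' : (colors.length : Int) - 1 ∉ PySem.Set.add V i := by
          rw [PySem.Set.mem_add]
          rintro (h | h)
          · exact h3 h
          · exact hin h.symm
        have h4' : ∀ c, M2.getD c PySem.Set.empty = (pvCmapA colors).getD c PySem.Set.empty ∨
            (M2.getD c PySem.Set.empty = PySem.Set.empty ∧
             ∀ j ∈ (pvCmapA colors).getD c PySem.Set.empty, j ∈ reached ∨ j ∈ N3) := by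
          intro c
          by_cases hc : c = PySem.List.pyGetD colors i 0
          · subst hc
            rw [hM2, PySem.Dict.getD_insert_self]
            exact Or.inr ⟨rfl, factK⟩
          · rw [hM2, PySem.Dict.getD_insert, if_neg hc]
            rcases h4 c with hint | ⟨hclr, hcov⟩
            · exact Or.inl hint
            · exact Or.inr ⟨hclr, fun j hj => (hcov j hj).imp id (hNsub j)⟩
        have h5' : ∀ i' ∈ PySem.Set.add V i, ∀ j, pvNbr colors i' j → j ∈ reached ∨ j ∈ N3 := by
          intro i' hi' j hnbr
          rw [PySem.Set.mem_add] at hi'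
          rcases hi' with h | rfl
          · exact (h5 i' h j hnbr).imp id (hNsub j)
          · exact factNbrI j hnbr
        have h6' : ∀ x ∈ N3, (x ∈ reached ∨ ∃ i' ∈ reached, pvNbr colors i' x) ∧
            0 ≤ x ∧ x < (colors.length : Int) := by
          intro x hx
          rcases (hmem3 x).1 hx with h | ⟨hxc, hxi, hxV⟩
          · rcases (hmem2 x).1 h with h | ⟨⟨hpos, _⟩, rfl⟩ | ⟨⟨hlt, _⟩, rfl⟩
            · exact h6 x h
            · exact ⟨Or.inr ⟨i, hiR, Or.inl ⟨rfl, hpos⟩⟩, by omega, by omega⟩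
            · exact ⟨Or.inr ⟨i, hiR, Or.inr (Or.inl ⟨rfl, hlt⟩)⟩, by omega, hlt⟩
          · rcases h4 (PySem.List.pyGetD colors i 0) with hint | ⟨hclr, _⟩
            · have hxcls : x ∈ (pvCmapA colors).getD (PySem.List.pyGetD colors i 0)
                  PySem.Set.empty := by
                rw [← hint, ← hcls]; exact hxc
              obtain ⟨hge, hlt, hcol⟩ := (mem_pvCmapA colors _ x).1 hxcls
              exact ⟨Or.inr ⟨i, hiR, Or.inr (Or.inr ⟨hxi, hge, hlt, by rw [hcol, hcolEq]⟩)⟩,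
                hge, hlt⟩
            · rw [hcls, hclr] at hxc
              exact absurd hxc (by simp [PySem.Set.empty])
        obtain ⟨c1, c2, c3⟩ := ih (PySem.Set.add V i) N3 M2 h1' h2' h3' h4' h5' h6'
        rw [heq]
        refine ⟨?_, ?_, ?_⟩
        · intro hL
          rcases List.mem_cons.1 hL with he | h
          · exact absurd he.symm hin
          · exact c1 h
        · intro h; exact List.mem_cons_of_mem _ (c2 h)
        · intro V' N' M' h
          obtain ⟨cViff, ch3, ch4, ch5, ch6⟩ := c3 V' N' M' h
          refine ⟨?_, ch3, ch4, ch5, ch6⟩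
          intro x
          rw [cViff x, PySem.Set.mem_add, List.mem_cons]
          tauto

theorem closed_reaches_all (colors : List Int) (S : PySem.Set Int)
    (h0 : (0 : Int) ∈ S) (hcl : ∀ i ∈ S, ∀ j, pvNbr colors i j → j ∈ S) :
    ∀ m : Nat, m < colors.length → (m : Int) ∈ S := by
  intro m
  induction m with
  | zero => intro _; exact h0
  | succ p ih =>
    intro hlt
    have hp : (p : Int) ∈ S := ih (by omega)
    have hc : ((p : Nat) : Int) + 1 < (colors.length : Int) := by exact_mod_cast hlt
    have := hcl _ hp ((p : Int) + 1) (Or.inr (Or.inl ⟨rfl, hc⟩))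
    exact_mod_cast this

theorem loop_eq (colors : List Int) (hne : colors ≠ []) :
    ∀ (fuel : Nat) (k : Int) (frontier V : PySem.Set Int)
      (M : PySem.Dict Int (PySem.Set Int)) (reached : PySem.Set Int),
    (∀ x, x ∈ reached ↔ (x ∈ V ∨ x ∈ frontier)) →
    ((colors.length : Int) - 1 ∉ V) →
    (∀ c, M.getD c PySem.Set.empty = (pvCmapA colors).getD c PySem.Set.empty ∨
          (M.getD c PySem.Set.empty = PySem.Set.empty ∧
           ∀ j ∈ (pvCmapA colors).getD c PySem.Set.empty, j ∈ reached)) →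
    (∀ i ∈ V, ∀ j, pvNbr colors i j → j ∈ reached) →
    (∀ x ∈ reached, 0 ≤ x ∧ x < (colors.length : Int)) →
    ((0 : Int) ∈ reached) →
    pvLoopA colors (colors.length : Int) fuel frontier V M k =
      pvLoopB colors (colors.length : Int) (pvCmapB colors) fuel reached k := by
  intro fuel
  induction fuel with
  | zero => intros; rfl
  | succ f ih =>
    intro k frontier V M reached hinv h3 h4 h5 hRg h0
    obtain ⟨hLA1, hLA2, hLA3⟩ := pvLevelA_inv colors reached hRg frontier V PySem.Set.empty M
      (fun x hx => (hinv x).2 (Or.inr hx)) (fun x hx => (hinv x).2 (Or.inl hx)) h3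
      (fun c => (h4 c).imp id (fun hh => ⟨hh.1, fun j hj => Or.inl (hh.2 j hj)⟩))
      (fun i hi j hn => Or.inl (h5 i hi j hn))
      (by intro x hx; exact absurd hx (by simp [PySem.Set.empty]))
    by_cases hlast : ((colors.length : Int) - 1) ∈ reached
    · have hf : ((colors.length : Int) - 1) ∈ frontier := by
        rcases (hinv _).1 hlast with h | h
        · exact absurd h h3
        · exact h
      have hfne : ¬ (frontier = PySem.Set.empty) := by
        intro h; rw [h] at hf; exact absurd hf (by simp [PySem.Set.empty])
      simp only [pvLoopA, pvLoopB, if_neg hfne, if_pos hlast, hLA1 hf]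
    · have hfne : ¬ (frontier = PySem.Set.empty) := by
        intro hemp
        have hcl : ∀ i ∈ reached, ∀ j, pvNbr colors i j → j ∈ reached := by
          intro i hi j hn
          rcases (hinv i).1 hi with hv | hfr
          · exact h5 i hv j hn
          · rw [hemp] at hfr; exact absurd hfr (by simp [PySem.Set.empty])
        have hlen : 1 ≤ colors.length := List.length_pos_iff.2 hne
        have hr := closed_reaches_all colors reached h0 hcl (colors.length - 1) (by omega)
        have hcast : ((colors.length - 1 : Nat) : Int) = (colors.length : Int) - 1 := by
          omega
        rw [hcast] at hr
        exact hlast hr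
      cases hres : pvLevelA colors (colors.length : Int) frontier V PySem.Set.empty M with
      | none =>
        exact absurd ((hinv _).2 (Or.inr (hLA2 hres))) hlast
      | some t =>
        obtain ⟨V', N', M'⟩ := t
        obtain ⟨cViff, ch3, ch4, ch5, ch6⟩ := hLA3 V' N' M' hres
        have hsubR : ∀ x ∈ reached, x ∈ pvExpandB colors (colors.length : Int)
            (pvCmapB colors) reached := by
          intro x hx
          exact (mem_pvExpandB colors _ _ reached x).2 (Or.inl hx)
        have hV'sub : ∀ x ∈ V', x ∈ reached := by
          intro x hx
          exact (hinv x).2 ((cViff x).1 hx)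
        have hRV' : ∀ x ∈ reached, x ∈ V' := by
          intro x hx
          exact (cViff x).2 ((hinv x).1 hx)
        have hinv' : ∀ x, x ∈ pvExpandB colors (colors.length : Int) (pvCmapB colors) reached ↔
            (x ∈ V' ∨ x ∈ N') := by
          intro x
          constructor
          · intro hx
            rw [mem_pvExpandB] at hx
            rcases hx with hx | ⟨i2, hi2, hcase⟩
            · exact Or.inl (hRV' x hx)
            · have hi2V' : i2 ∈ V' := hRV' i2 hi2
              rcases hcase with ⟨hpos, rfl⟩ | ⟨hlt, rfl⟩ | hcm
              · by_cases hz : 0 < i2 - 1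
                · rcases ch5 i2 hi2V' (i2 - 1) (Or.inl ⟨rfl, hz⟩) with h | h
                  · exact Or.inl (hRV' _ h)
                  · exact Or.inr h
                · have hz2 : i2 - 1 = 0 := by omega
                  rw [hz2]
                  exact Or.inl (hRV' 0 h0)
              · rcases ch5 i2 hi2V' (i2 + 1) (Or.inr (Or.inl ⟨rfl, hlt⟩)) with h | h
                · exact Or.inl (hRV' _ h)
                · exact Or.inr h
              · rw [mem_pvCmapB] at hcm
                obtain ⟨hge, hlt2, hcol⟩ := hcm
                by_cases hxi : x = i2
                · exact Or.inl (hRV' x (hxi ▸ hi2))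
                · rcases ch5 i2 hi2V' x (Or.inr (Or.inr ⟨hxi, hge, hlt2, hcol⟩)) with h | h
                  · exact Or.inl (hRV' _ h)
                  · exact Or.inr h
          · intro hx
            rw [mem_pvExpandB]
            rcases hx with hx | hx
            · exact Or.inl ((hinv x).2 ((cViff x).1 hx))
            · rcases (ch6 x hx).1 with h | ⟨i2, hi2, hn⟩
              · exact Or.inl h
              · refine Or.inr ⟨i2, hi2, ?_⟩
                rcases hn with ⟨rfl, hp⟩ | ⟨rfl, hp⟩ | ⟨hne2, hge, hlt2, hcol⟩
                · exact Or.inl ⟨by omega, rfl⟩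
                · exact Or.inr (Or.inl ⟨hp, rfl⟩)
                · exact Or.inr (Or.inr ((mem_pvCmapB colors _ x).2 ⟨hge, hlt2, hcol⟩))
        have hN'sub : ∀ x ∈ N', x ∈ pvExpandB colors (colors.length : Int)
            (pvCmapB colors) reached := by
          intro x hx
          exact (hinv' x).2 (Or.inr hx)
        have h4' : ∀ c, M'.getD c PySem.Set.empty = (pvCmapA colors).getD c PySem.Set.empty ∨
            (M'.getD c PySem.Set.empty = PySem.Set.empty ∧
             ∀ j ∈ (pvCmapA colors).getD c PySem.Set.empty,
               j ∈ pvExpandB colors (colors.length : Int) (pvCmapB colors) reached) := by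
          intro c
          rcases ch4 c with h | ⟨h, hcov⟩
          · exact Or.inl h
          · refine Or.inr ⟨h, fun j hj => ?_⟩
            rcases hcov j hj with h2 | h2
            · exact hsubR j h2
            · exact hN'sub j h2
        have h5' : ∀ i2 ∈ V', ∀ j, pvNbr colors i2 j →
            j ∈ pvExpandB colors (colors.length : Int) (pvCmapB colors) reached := by
          intro i2 hi2 j hn
          rcases ch5 i2 hi2 j hn with h | h
          · exact hsubR j h
          · exact hN'sub j h
        have hRg' : ∀ x ∈ pvExpandB colors (colors.length : Int) (pvCmapB colors) reached,
            0 ≤ x ∧ x < (colors.length : Int) := by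
          intro x hx
          rcases (hinv' x).1 hx with h | h
          · exact hRg x (hV'sub x h)
          · exact (ch6 x h).2
        simp only [pvLoopA, pvLoopB, if_neg hfne, if_neg hlast, hres]
        exact ih (k + 1) N' V' M' _ hinv' ch3 h4' h5' hRg' (hsubR 0 h0)

-- ===== VERDICT (by name: the statement is the Claim_ definition above) =====
theorem minimumStep_spec : Claim_equal_minimumStep := by
  intro colors _ hpre
  unfold Spec_minimumStep minimumStep minimumStep_alt
  have hlen : 1 ≤ colors.length := List.length_pos_iff.2 hpre
  apply loop_eq colors hpre
  · intro x; simp [PySem.Set.empty]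
  · simp [PySem.Set.empty]
  · intro c; exact Or.inl rfl
  · intro i hi; simp [PySem.Set.empty] at hi
  · intro x hx
    simp [PySem.Set.mem_ofList] at hx
    subst hx
    constructor <;> omega
  · simp [PySem.Set.mem_ofList]
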